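-- pv_equiv track=rewrite | github.com/naimsassine/KIP-IP | kep_algo.py | construction_xc
-- ===== SOURCE A (Python) =====
-- def cycle_to_arc(cycle):
--     list = []
--     for i in range(len(cycle)-1):
-- 	       list.append((cycle[i],cycle[i+1]))
--
--     return (list)
--
-- def construction_xc(cycles, cycle_costs, x):
--     x_c = x.copy()
--     for k in x_c :
--         x_c[k] = 0
--     found = False
--     position = 0
--     position = cycle_costs.index(max(cycle_costs))
--     if (cycle_costs[position] > 0):
--         found = True
--     if found == True :
--         pc_found = cycles[position]
--         arcs_of_cycle = cycle_to_arc(pc_found)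
--         for i in x_c :
--             uv = (i[0],i[1])
--             vu = (i[1],i[0])
--             if uv in arcs_of_cycle :
--                 x_c[i] = 1
--             elif vu in arcs_of_cycle :
--                 x_c[i] = -1
--             else :
--                 x_c[i] = 0
--     return x_c
-- ===== SOURCE B (Python) =====
-- def construction_xc(cycles, cycle_costs, x):
--     x_c = dict.fromkeys(x, 0)
--     best = max(cycle_costs)
--     if best > 0:
--         cycle = cycles[cycle_costs.index(best)]
--         arcs = list(zip(cycle, cycle[1:]))
--         for (a, b) in arcs:
--             if (b, a) in x_c:
--                 x_c[(b, a)] = -1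
--         for (a, b) in arcs:
--             if (a, b) in x_c:
--                 x_c[(a, b)] = 1
--     return x_c
-- ===== Notes on version B (the rewrite author's own statement) =====
-- stated objective: faster
-- what changed: Instead of scanning every dict key against the arc list (a linear 'in' test per key), B builds the arcs of the chosen cycle once and makes two passes over them with O(1) dict lookups: first marking reverse arcs -1, then forward arcs 1 (forward overwrites reverse, matching A's uv-first priority); keys untouched stay at 0.
import Mathlib
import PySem

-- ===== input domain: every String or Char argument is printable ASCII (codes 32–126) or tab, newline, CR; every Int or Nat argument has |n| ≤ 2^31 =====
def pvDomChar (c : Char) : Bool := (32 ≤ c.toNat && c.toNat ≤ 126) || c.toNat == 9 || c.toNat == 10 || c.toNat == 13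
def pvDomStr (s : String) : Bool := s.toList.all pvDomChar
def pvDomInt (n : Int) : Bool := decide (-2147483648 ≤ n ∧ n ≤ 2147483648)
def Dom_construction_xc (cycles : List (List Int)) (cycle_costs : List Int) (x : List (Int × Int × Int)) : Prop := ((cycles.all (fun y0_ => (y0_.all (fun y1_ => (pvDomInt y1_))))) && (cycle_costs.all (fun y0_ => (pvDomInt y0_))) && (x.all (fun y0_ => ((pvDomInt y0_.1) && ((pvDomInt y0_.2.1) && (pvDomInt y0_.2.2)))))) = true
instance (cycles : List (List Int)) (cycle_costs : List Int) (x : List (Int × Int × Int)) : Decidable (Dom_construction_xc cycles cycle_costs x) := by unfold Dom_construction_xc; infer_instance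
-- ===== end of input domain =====

-- B drives the marking over the chosen cycle's arcs (two passes over the arcs, dict lookups)
-- instead of A's scan of every dict key against the arc list; return values are equal on Pre_.
-- x is a Python dict (distinct keys); its value-rewriting loops are ported as maps over the
-- association list, which is exact for a dict.

-- ===== PORT A =====
def cycle_to_arc (cycle : List Int) : List (Int × Int) :=
  (PySem.List.pyRange 0 ((cycle.length : Int) - 1) 1).foldl
    (fun acc i => acc ++ [(PySem.List.pyGetD cycle i 0, PySem.List.pyGetD cycle (i + 1) 0)]) []

def construction_xc (cycles : List (List Int)) (cycle_costs : List Int) (x : List (Int × Int × Int)) : List (Int × Int × Int) :=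
  let x_c := x.map (fun k => (k.1, k.2.1, (0 : Int)))   -- for k in x_c: x_c[k] = 0
  match PySem.List.max? cycle_costs (fun y => y) with
  | none => x_c                                          -- max([]) raises: outside Pre_
  | some m =>
    let position : Nat := (PySem.List.index? cycle_costs m).getD 0
    let found := 0 < PySem.List.pyGetD cycle_costs (position : Int) 0
    if found then
      match PySem.List.pyGet? cycles (position : Int) with
      | none => x_c                                      -- cycles[position] raises: outside Pre_
      | some pc_found =>
        let arcs_of_cycle := cycle_to_arc pc_found
        x_c.map (fun i =>
          if (i.1, i.2.1) ∈ arcs_of_cycle then (i.1, i.2.1, (1 : Int))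
          else if (i.2.1, i.1) ∈ arcs_of_cycle then (i.1, i.2.1, (-1 : Int))
          else (i.1, i.2.1, (0 : Int)))
    else x_c

-- ===== PORT B =====
-- dict assignment 'x_c[k] = v' guarded by 'if k in x_c': update the matching entries, else no-op
def setIfPresent (d : List (Int × Int × Int)) (k : Int × Int) (v : Int) : List (Int × Int × Int) :=
  d.map (fun kv => if (kv.1, kv.2.1) = k then (kv.1, kv.2.1, v) else kv)

def construction_xc_alt (cycles : List (List Int)) (cycle_costs : List Int) (x : List (Int × Int × Int)) : List (Int × Int × Int) :=
  let x_c := x.map (fun k => (k.1, k.2.1, (0 : Int)))   -- dict.fromkeys(x, 0)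
  match PySem.List.max? cycle_costs (fun y => y) with
  | none => x_c                                          -- max([]) raises: outside Pre_
  | some best =>
    if 0 < best then
      match PySem.List.pyGet? cycles (((PySem.List.index? cycle_costs best).getD 0 : Nat) : Int) with
      | none => x_c                                      -- raises: outside Pre_
      | some cycle =>
        let arcs := cycle.zip (cycle.drop 1)
        let d1 := arcs.foldl (fun d ab => setIfPresent d (ab.2, ab.1) (-1)) x_c
        arcs.foldl (fun d ab => setIfPresent d (ab.1, ab.2) 1) d1
    else x_c

-- ===== PRECONDITION & SPEC =====
-- Pre_ excludes exactly the inputs where A raises: empty cycle_costs (ValueError from max),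
-- and a positive maximum whose first index is out of range of cycles (IndexError).
def Pre_construction_xc (cycles : List (List Int)) (cycle_costs : List Int) (x : List (Int × Int × Int)) : Prop :=
  cycle_costs ≠ [] ∧
    (0 < (PySem.List.max? cycle_costs (fun y => y)).getD 0 →
      (PySem.List.index? cycle_costs ((PySem.List.max? cycle_costs (fun y => y)).getD 0)).getD 0 < cycles.length)
instance (cycles : List (List Int)) (cycle_costs : List Int) (x : List (Int × Int × Int)) : Decidable (Pre_construction_xc cycles cycle_costs x) := by unfold Pre_construction_xc; infer_instance

def pvWitness_construction_xc : List (List Int) × List Int × (List (Int × Int × Int)) :=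
  ([[1, 2, 1]], [5], [(1, 2, 7), (2, 1, 3)])

def Spec_construction_xc (cycles : List (List Int)) (cycle_costs : List Int) (x : List (Int × Int × Int)) (out : List (Int × Int × Int)) : Prop := out = construction_xc_alt cycles cycle_costs x
instance (cycles : List (List Int)) (cycle_costs : List Int) (x : List (Int × Int × Int)) (out : List (Int × Int × Int)) : Decidable (Spec_construction_xc cycles cycle_costs x out) := by unfold Spec_construction_xc; infer_instance

-- ===== CLAIM (what is proved, stated in full; the proofs are below) =====
def Claim_equal_construction_xc : Prop := ∀ (cycles : List (List Int)) (cycle_costs : List Int) (x : List (Int × Int × Int)), Dom_construction_xc cycles cycle_costs x → Pre_construction_xc cycles cycle_costs x → Spec_construction_xc cycles cycle_costs x (construction_xc cycles cycle_costs x)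

-- ===== LEMMAS AND PROOFS =====

-- A's index loop builds exactly the consecutive pairs
lemma range_pairs_eq_zip (l : List Int) :
    (List.range (l.length - 1)).map (fun i => (l.getD i 0, l.getD (i + 1) 0))
      = l.zip (l.drop 1) := by
  induction l with
  | nil => simp
  | cons a t ih =>
    cases t with
    | nil => simp
    | cons b u =>
      have h : (a :: b :: u : List Int).length - 1 = (b :: u : List Int).length - 1 + 1 := by
        simp
      rw [h, List.range_succ_eq_map, List.map_cons, List.map_map]
      simp only [List.zip, List.drop_succ_cons, List.drop_zero] at *
      simp only [List.getD_cons_zero, List.getD_cons_succ]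
      rw [show (List.zipWith Prod.mk (a :: b :: u) (b :: u))
            = (a, b) :: List.zipWith Prod.mk (b :: u) u from rfl]
      exact congrArg _ ih

lemma cycle_to_arc_eq_zip (cycle : List Int) :
    cycle_to_arc cycle = cycle.zip (cycle.drop 1) := by
  unfold cycle_to_arc
  rw [PySem.List.foldl_append_singleton_eq_map]
  cases cycle with
  | nil => simp [PySem.List.pyRange_one_eq_nil]
  | cons a t =>
    have h : ((a :: t : List Int).length : Int) - 1 = ((t.length : Nat) : Int) := by
      simp
    rw [h, PySem.List.pyRange_zero_natCast, List.map_map]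
    have h2 : (a :: t : List Int).length - 1 = t.length := by simp
    rw [← h2, ← range_pairs_eq_zip (a :: t)]
    apply List.map_congr_left
    intro i _
    simp only [Function.comp]
    rw [PySem.List.pyGetD_natCast]
    have : ((i : Int) + 1) = ((i + 1 : Nat) : Int) := by push_cast; ring
    rw [this, PySem.List.pyGetD_natCast]

-- folding setIfPresent over arcs = one map marking the keys hit by f
lemma foldl_setIfPresent (arcs : List (Int × Int)) (f : Int × Int → Int × Int) (c : Int) :
    ∀ d : List (Int × Int × Int),
      arcs.foldl (fun d ab => setIfPresent d (f ab) c) d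
        = d.map (fun kv => if (kv.1, kv.2.1) ∈ arcs.map f then (kv.1, kv.2.1, c) else kv) := by
  induction arcs with
  | nil => intro d; simp
  | cons a as ih =>
    intro d
    rw [List.foldl_cons, ih, setIfPresent, List.map_map]
    apply List.map_congr_left
    intro kv _
    simp only [Function.comp, List.map_cons, List.mem_cons]
    by_cases hk : (kv.1, kv.2.1) = f a
    · simp [hk]
    · by_cases hm : (kv.1, kv.2.1) ∈ as.map f <;> simp [hk, hm]

lemma mem_map_swap (p : Int × Int) (l : List (Int × Int)) :
    p ∈ l.map (fun ab => (ab.2, ab.1)) ↔ (p.2, p.1) ∈ l := by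
  constructor
  · rintro h
    rcases List.mem_map.1 h with ⟨ab, hab, rfl⟩
    simpa using hab
  · intro h
    exact List.mem_map.2 ⟨(p.2, p.1), h, rfl⟩

lemma position_value (cycle_costs : List Int) (m : Int)
    (hm : PySem.List.max? cycle_costs (fun y => y) = some m) :
    PySem.List.pyGetD cycle_costs (((PySem.List.index? cycle_costs m).getD 0 : Nat) : Int) 0 = m := by
  have hmem : m ∈ cycle_costs := PySem.List.max?_mem hm
  rcases Option.isSome_iff_exists.1 ((PySem.List.index?_isSome_iff cycle_costs m).2 hmem) with ⟨j, hj⟩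
  rcases PySem.List.getElem_of_index?_eq_some hj with ⟨hlt, hval, _⟩
  rw [hj, Option.getD_some, PySem.List.pyGetD_natCast, List.getD_eq_getElem _ _ hlt, hval]

-- ===== VERDICT (by name: the statement is the Claim_ definition above) =====
theorem construction_xc_spec : Claim_equal_construction_xc := by
  intro cycles cycle_costs x _ _
  unfold Spec_construction_xc construction_xc construction_xc_alt
  cases hm : PySem.List.max? cycle_costs (fun y => y) with
  | none => rfl
  | some m =>
    simp only []
    rw [position_value cycle_costs m hm]
    by_cases hpos : 0 < m
    · simp only [hpos, if_true]
      cases hg : PySem.List.pyGet? cycles (((PySem.List.index? cycle_costs m).getD 0 : Nat) : Int) with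
      | none => rfl
      | some cycle =>
        dsimp only
        rw [cycle_to_arc_eq_zip, foldl_setIfPresent, foldl_setIfPresent, List.map_map, List.map_map, List.map_map]
        apply List.map_congr_left
        intro w _
        by_cases h1 : (w.1, w.2.1) ∈ cycle.zip cycle.tail <;>
          by_cases h2 : (w.2.1, w.1) ∈ cycle.zip cycle.tail <;>
            simp [Function.comp, mem_map_swap, h1, h2]
    · simp [hpos]
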